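-- pv_equiv track=rewrite | github.com/DongFeng33550336/IBI1_2025-26 | Practical7/stop_codons.py | find_stops
-- ===== SOURCE A (Python) =====
-- def find_stops(seq):
--     stops_present = set()
--     for i in range(len(seq)):
--         if seq[i:i+3] == 'ATG':
--             for j in range(i, len(seq)-2, 3):
--                 c = seq[j:j+3]
--                 if c in ['TAA', 'TAG', 'TGA']:
--                     stops_present.add(c)
--                     break
--     return sorted(list(stops_present))
-- ===== SOURCE B (Python) =====
-- def find_stops(seq):
--     # Single backward pass: next_stop[r] holds the nearest in-frame stop codon
--     # at or after the current position in reading frame r; an ATG just reads it.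
--     next_stop = {}
--     found = set()
--     for p in range(len(seq) - 3, -1, -1):
--         codon = seq[p:p+3]
--         if codon in ('TAA', 'TAG', 'TGA'):
--             next_stop[p % 3] = codon
--         elif codon == 'ATG':
--             nxt = next_stop.get(p % 3)
--             if nxt is not None:
--                 found.add(nxt)
--     return sorted(found)
-- ===== Notes on version B (the rewrite author's own statement) =====
-- stated objective: alternative
-- what changed: A rescans forward from every ATG occurrence for its first in-frame stop codon (quadratic when ATGs pile up); B makes one backward pass keeping a dict of the nearest following in-frame stop codon per reading frame, so each ATG is answered by a single dict lookup and no per-ATG rescan exists.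
import Mathlib
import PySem

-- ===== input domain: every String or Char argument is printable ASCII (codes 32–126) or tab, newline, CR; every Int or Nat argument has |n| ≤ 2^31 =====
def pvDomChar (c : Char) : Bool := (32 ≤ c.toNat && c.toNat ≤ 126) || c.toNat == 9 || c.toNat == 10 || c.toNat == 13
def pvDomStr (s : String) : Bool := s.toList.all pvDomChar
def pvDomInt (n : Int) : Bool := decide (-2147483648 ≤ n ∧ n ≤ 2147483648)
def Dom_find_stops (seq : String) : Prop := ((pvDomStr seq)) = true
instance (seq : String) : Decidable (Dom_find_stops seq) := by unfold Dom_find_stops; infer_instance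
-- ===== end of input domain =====

-- B replaces A's per-ATG forward rescan by ONE backward pass that maintains, per reading
-- frame, the nearest following in-frame stop codon in a dict (objective: alternative).

-- ===== PORT A =====
-- inner loop 'for j in range(i, len(seq)-2, 3): … break' of A, as structural recursion on the range list
def pvInnerA (seq : String) : List Int → PySem.Set String → PySem.Set String
  | [], st => st
  | j :: rest, st =>
      let c := PySem.Str.slice seq (some j) (some (j + 3))
      if ["TAA", "TAG", "TGA"].contains c then PySem.Set.add st c
      else pvInnerA seq rest st

def find_stops (seq : String) : List String :=
  let n : Int := PySem.Str.len seq
  let stops_present :=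
    (PySem.List.pyRange 0 n 1).foldl
      (fun st i =>
        if PySem.Str.slice seq (some i) (some (i + 3)) = "ATG" then
          pvInnerA seq (PySem.List.pyRange i (n - 2) 3) st
        else st)
      PySem.Set.empty
  PySem.List.sorted stops_present (fun x => x)

-- ===== PORT B =====
-- loop body of B: a stop codon updates the per-frame nearest-stop dict; an ATG reads it
def pvStepB (seq : String) (acc : PySem.Dict Int String × PySem.Set String) (p : Int) :
    PySem.Dict Int String × PySem.Set String :=
  let codon := PySem.Str.slice seq (some p) (some (p + 3))
  if ["TAA", "TAG", "TGA"].contains codon then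
    (acc.1.insert (PySem.Int.mod p 3) codon, acc.2)
  else if codon = "ATG" then
    match acc.1.get? (PySem.Int.mod p 3) with
    | some nxt => (acc.1, PySem.Set.add acc.2 nxt)
    | none => acc
  else acc

def find_stops_alt (seq : String) : List String :=
  let res :=
    (PySem.List.pyRange (PySem.Str.len seq - 3) (-1) (-1)).foldl (pvStepB seq)
      (PySem.Dict.empty, PySem.Set.empty)
  PySem.List.sorted res.2 (fun x => x)

-- ===== PRECONDITION & SPEC =====
def Spec_find_stops (seq : String) (out : List String) : Prop := out = find_stops_alt seq
instance (seq : String) (out : List String) : Decidable (Spec_find_stops seq out) := by unfold Spec_find_stops; infer_instance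

-- ===== CLAIM (what is proved, stated in full; the proofs are below) =====
def Claim_equal_find_stops : Prop := ∀ (seq : String), Dom_find_stops seq → Spec_find_stops seq (find_stops seq)

-- ===== LEMMAS AND PROOFS =====

-- proof-side abbreviations
def pvCodon (seq : String) (j : Int) : String := PySem.Str.slice seq (some j) (some (j + 3))

def pvFirstStop (seq : String) : List Int → Option String
  | [] => none
  | j :: rest =>
      if ["TAA", "TAG", "TGA"].contains (pvCodon seq j) then some (pvCodon seq j)
      else pvFirstStop seq rest

-- nearest in-frame stop codon at a position ≥ q in q's frame
def pvFS (seq : String) (q : Int) : Option String :=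
  pvFirstStop seq (PySem.List.pyRange q (PySem.Str.len seq - 2) 3)

def pvSetA (seq : String) : PySem.Set String :=
  (PySem.List.pyRange 0 (PySem.Str.len seq) 1).foldl
    (fun st i =>
      if PySem.Str.slice seq (some i) (some (i + 3)) = "ATG" then
        pvInnerA seq (PySem.List.pyRange i (PySem.Str.len seq - 2) 3) st
      else st)
    PySem.Set.empty

def pvSetB (seq : String) : PySem.Set String :=
  ((PySem.List.pyRange (PySem.Str.len seq - 3) (-1) (-1)).foldl (pvStepB seq)
      (PySem.Dict.empty, PySem.Set.empty)).2

lemma find_stops_eq (seq : String) :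
    find_stops seq = PySem.List.sorted (pvSetA seq) (fun x => x) := rfl

lemma find_stops_alt_eq (seq : String) :
    find_stops_alt seq = PySem.List.sorted (pvSetB seq) (fun x => x) := rfl

-- range with step 3: cons and nil forms
lemma pyRange_cons3 (a b : Int) (hab : a < b) :
    PySem.List.pyRange a b 3 = a :: PySem.List.pyRange (a + 3) b 3 := by
  rw [PySem.List.pyRange_of_pos a b (by norm_num), PySem.List.pyRange_of_pos (a+3) b (by norm_num)]
  rw [if_pos hab]
  have h1 : b - a + 3 - 1 = (b - a - 1) + 1 * 3 := by ring
  rw [h1, Int.add_mul_ediv_right _ _ (by norm_num)]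
  have hnn : 0 ≤ (b - a - 1) / 3 := Int.ediv_nonneg (by omega) (by norm_num)
  have h2 : ((b - a - 1) / 3 + 1).toNat = ((b - a - 1) / 3).toNat + 1 := by omega
  have h3 : (if a + 3 < b then ((b - (a + 3) + 3 - 1) / 3).toNat else 0) = ((b - a - 1) / 3).toNat := by
    split_ifs with h
    · congr 1; congr 1; ring
    · have hlt : b - a - 1 < 3 := by omega
      have := Int.ediv_eq_zero_of_lt (by omega : (0:Int) ≤ b - a - 1) hlt
      omega
  rw [h2, h3, List.range_succ_eq_map]
  simp only [List.map_cons, List.map_map]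
  congr 1
  · simp
  · apply List.map_congr_left; intro k _; simp [Function.comp]; ring

lemma pyRange_nil3 (a b : Int) (hba : b ≤ a) :
    PySem.List.pyRange a b 3 = [] := by
  rw [PySem.List.pyRange_of_pos a b (by norm_num)]
  rw [if_neg (by omega)]
  simp

-- a codon of length 3 lies fully inside the string
lemma codon_len (seq : String) (i : Int) (hi : 0 ≤ i) (h : (pvCodon seq i).toList.length = 3) :
    i + 3 ≤ PySem.Str.len seq := by
  obtain ⟨m, rfl⟩ := Int.eq_ofNat_of_zero_le hi
  unfold pvCodon at h
  rw [PySem.Str.toList_slice] at h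
  simp only [PySem.Chars.slice_eq_listSlice] at h
  have h3 : ((m:Int) + 3) = ((m + 3 : Nat) : Int) := by push_cast; ring
  rw [h3, PySem.List.length_slice, PySem.List.clampIdx_natCast, PySem.List.clampIdx_natCast] at h
  rw [PySem.Str.len_eq]
  omega

lemma codon_len_atg (seq : String) (i : Int) (hi : 0 ≤ i) (h : pvCodon seq i = "ATG") :
    i + 3 ≤ PySem.Str.len seq :=
  codon_len seq i hi (by rw [h]; decide)

lemma stop_cases (s : String) (h : (["TAA", "TAG", "TGA"].contains s) = true) :
    s = "TAA" ∨ s = "TAG" ∨ s = "TGA" := by simpa using h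

lemma stop_ne_atg (s : String) (h : (["TAA", "TAG", "TGA"].contains s) = true) :
    s ≠ "ATG" := by
  rcases stop_cases _ h with h' | h' | h' <;> rw [h'] <;> decide

-- pvFS step facts
lemma pvFS_none (seq : String) (q : Int) (h : PySem.Str.len seq - 2 ≤ q) :
    pvFS seq q = none := by
  unfold pvFS
  rw [pyRange_nil3 _ _ h]
  rfl

lemma firstStop_cons (seq : String) (q : Int) (l : List Int) :
    pvFirstStop seq (q :: l) =
      if ["TAA", "TAG", "TGA"].contains (pvCodon seq q) then some (pvCodon seq q)
      else pvFirstStop seq l := rfl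

lemma pvFS_stop (seq : String) (q : Int) (hq : q < PySem.Str.len seq - 2)
    (h : (["TAA", "TAG", "TGA"].contains (pvCodon seq q)) = true) :
    pvFS seq q = some (pvCodon seq q) := by
  unfold pvFS
  rw [pyRange_cons3 _ _ hq, firstStop_cons, if_pos h]

lemma pvFS_skip (seq : String) (q : Int) (hq : q < PySem.Str.len seq - 2)
    (h : (["TAA", "TAG", "TGA"].contains (pvCodon seq q)) = false) :
    pvFS seq q = pvFS seq (q + 3) := by
  unfold pvFS
  rw [pyRange_cons3 _ _ hq, firstStop_cons, if_neg (by rw [h]; exact Bool.false_ne_true)]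

-- mod-3 arithmetic
lemma mod3_add3 (p : Int) : PySem.Int.mod (p + 3) 3 = PySem.Int.mod p 3 := by
  rw [PySem.Int.mod_eq_emod_of_pos (show (0:Int) < 3 by norm_num),
    PySem.Int.mod_eq_emod_of_pos (show (0:Int) < 3 by norm_num)]
  omega

lemma mod3_ne_1 (p : Int) : PySem.Int.mod (p + 1) 3 ≠ PySem.Int.mod p 3 := by
  rw [PySem.Int.mod_eq_emod_of_pos (show (0:Int) < 3 by norm_num),
    PySem.Int.mod_eq_emod_of_pos (show (0:Int) < 3 by norm_num)]
  omega

lemma mod3_ne_2 (p : Int) : PySem.Int.mod (p + 2) 3 ≠ PySem.Int.mod p 3 := by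
  rw [PySem.Int.mod_eq_emod_of_pos (show (0:Int) < 3 by norm_num),
    PySem.Int.mod_eq_emod_of_pos (show (0:Int) < 3 by norm_num)]
  omega

-- the backward-pass invariant: after processing positions ≥ q, the dict holds the nearest
-- in-frame stop for each frame (keyed by residue) and the set holds all recorded stops
def pvInv (seq : String) (q : Int) (st : PySem.Dict Int String × PySem.Set String) : Prop :=
  st.1.get? (PySem.Int.mod q 3) = pvFS seq q ∧
  st.1.get? (PySem.Int.mod (q + 1) 3) = pvFS seq (q + 1) ∧
  st.1.get? (PySem.Int.mod (q + 2) 3) = pvFS seq (q + 2) ∧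
  ∀ c, c ∈ st.2 ↔ ∃ i, q ≤ i ∧ pvCodon seq i = "ATG" ∧ pvFS seq (i + 3) = some c

lemma stepB_inv (seq : String) (p : Int) (st : PySem.Dict Int String × PySem.Set String)
    (_h0 : 0 ≤ p) (h1 : p ≤ PySem.Str.len seq - 3)
    (hinv : pvInv seq (p + 1) st) : pvInv seq p (pvStepB seq st p) := by
  obtain ⟨hd1, hd2, hd3, hf⟩ := hinv
  rw [show p + 1 + 1 = p + 2 from by ring] at hd2
  rw [show p + 1 + 2 = p + 3 from by ring] at hd3
  have hlt : p < PySem.Str.len seq - 2 := by omega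
  unfold pvStepB
  show pvInv seq p _
  by_cases hstop : (["TAA", "TAG", "TGA"].contains (pvCodon seq p)) = true
  · rw [show PySem.Str.slice seq (some p) (some (p + 3)) = pvCodon seq p from rfl]
    rw [if_pos hstop]
    refine ⟨?_, ?_, ?_, ?_⟩
    · rw [PySem.Dict.get?_insert_self, pvFS_stop seq p hlt hstop]
    · rw [PySem.Dict.get?_insert_of_ne _ _ (mod3_ne_1 p)]
      exact hd1
    · rw [PySem.Dict.get?_insert_of_ne _ _ (mod3_ne_2 p)]
      exact hd2
    · intro c
      rw [hf c]
      constructor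
      · rintro ⟨i, hi, hA, hF⟩; exact ⟨i, by omega, hA, hF⟩
      · rintro ⟨i, hi, hA, hF⟩
        refine ⟨i, ?_, hA, hF⟩
        rcases eq_or_lt_of_le hi with rfl | h
        · exact absurd hA (stop_ne_atg _ hstop)
        · omega
  · have hstop' : (["TAA", "TAG", "TGA"].contains (pvCodon seq p)) = false := by
      simpa using hstop
    have hd0 : st.1.get? (PySem.Int.mod p 3) = pvFS seq p := by
      rw [← mod3_add3 p, hd3, ← pvFS_skip seq p hlt hstop']
    rw [show PySem.Str.slice seq (some p) (some (p + 3)) = pvCodon seq p from rfl]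
    rw [if_neg (by rw [hstop']; exact Bool.false_ne_true)]
    by_cases hatg : pvCodon seq p = "ATG"
    · rw [if_pos hatg]
      have hFSp : pvFS seq p = pvFS seq (p + 3) := pvFS_skip seq p hlt hstop'
      cases hget : st.1.get? (PySem.Int.mod p 3) with
      | none =>
          show pvInv seq p st
          refine ⟨hd0, hd1, hd2, ?_⟩
          intro c
          rw [hf c]
          constructor
          · rintro ⟨i, hi, hA, hF⟩; exact ⟨i, by omega, hA, hF⟩
          · rintro ⟨i, hi, hA, hF⟩
            rcases eq_or_lt_of_le hi with rfl | h
            · exfalso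
              have hn : pvFS seq p = none := by rw [← hd0, hget]
              rw [← hFSp, hn] at hF
              simp at hF
            · exact ⟨i, by omega, hA, hF⟩
      | some nxt =>
          have hnxt : pvFS seq (p + 3) = some nxt := by
            rw [← hFSp, ← hd0, hget]
          show pvInv seq p (st.1, PySem.Set.add st.2 nxt)
          refine ⟨hd0, hd1, hd2, ?_⟩
          intro c
          rw [show ((st.1, PySem.Set.add st.2 nxt) : PySem.Dict Int String × PySem.Set String).2 = PySem.Set.add st.2 nxt from rfl]
          rw [PySem.Set.mem_add, hf c]
          constructor
          · rintro (⟨i, hi, hA, hF⟩ | rfl)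
            · exact ⟨i, by omega, hA, hF⟩
            · exact ⟨p, le_refl p, hatg, hnxt⟩
          · rintro ⟨i, hi, hA, hF⟩
            rcases eq_or_lt_of_le hi with rfl | h
            · right
              rw [hnxt] at hF
              exact (Option.some_inj.mp hF).symm
            · exact Or.inl ⟨i, by omega, hA, hF⟩
    · rw [if_neg hatg]
      refine ⟨hd0, hd1, hd2, ?_⟩
      intro c
      rw [hf c]
      constructor
      · rintro ⟨i, hi, hA, hF⟩; exact ⟨i, by omega, hA, hF⟩
      · rintro ⟨i, hi, hA, hF⟩
        rcases eq_or_lt_of_le hi with rfl | h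
        · exact absurd hA hatg
        · exact ⟨i, by omega, hA, hF⟩

lemma foldB_inv (seq : String) :
    ∀ (k : Nat) (p : Int), (p + 1).toNat = k → -1 ≤ p → p ≤ PySem.Str.len seq - 3 →
      ∀ st, pvInv seq (p + 1) st →
        pvInv seq 0 ((PySem.List.pyRange p (-1) (-1)).foldl (pvStepB seq) st) := by
  intro k
  induction k using Nat.strong_induction_on with
  | _ k IH =>
    intro p hk hm1 hn st hinv
    by_cases hp : p < 0
    · have hp1 : p = -1 := by omega
      subst hp1
      rw [PySem.List.pyRange_neg_one_eq_nil (by norm_num)]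
      simpa using hinv
    · rw [PySem.List.pyRange_neg_one_cons (by omega : (-1 : Int) < p)]
      rw [List.foldl_cons]
      have hstep := stepB_inv seq p st (by omega) hn hinv
      exact IH p.toNat (by omega) (p - 1) (by omega) (by omega) (by omega)
        (pvStepB seq st p) (by rw [show p - 1 + 1 = p from by ring]; exact hstep)

lemma stepB_snd (seq : String) (st : PySem.Dict Int String × PySem.Set String) (p : Int) :
    (pvStepB seq st p).2 = st.2 ∨ ∃ nxt, (pvStepB seq st p).2 = PySem.Set.add st.2 nxt := by
  unfold pvStepB
  by_cases h1 : (["TAA", "TAG", "TGA"].contains (PySem.Str.slice seq (some p) (some (p + 3)))) = true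
  · rw [if_pos h1]
    exact Or.inl rfl
  · rw [if_neg h1]
    by_cases h2 : PySem.Str.slice seq (some p) (some (p + 3)) = "ATG"
    · rw [if_pos h2]
      cases st.1.get? (PySem.Int.mod p 3) with
      | none => exact Or.inl rfl
      | some nxt => exact Or.inr ⟨nxt, rfl⟩
    · rw [if_neg h2]
      exact Or.inl rfl

lemma nodup_foldB (seq : String) :
    ∀ (l : List Int) (st : PySem.Dict Int String × PySem.Set String),
      st.2.Nodup → ((l.foldl (pvStepB seq) st)).2.Nodup := by
  intro l
  induction l with
  | nil => intro st h; exact h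
  | cons p rest ih =>
    intro st h
    rw [List.foldl_cons]
    apply ih
    rcases stepB_snd seq st p with he | ⟨nxt, he⟩
    · rw [he]; exact h
    · rw [he]; exact PySem.Set.nodup_add _ _ h

lemma inv_init (seq : String) (h2 : 2 ≤ PySem.Str.len seq) :
    pvInv seq (PySem.Str.len seq - 2)
      ((PySem.Dict.empty : PySem.Dict Int String), (PySem.Set.empty : PySem.Set String)) := by
  refine ⟨?_, ?_, ?_, ?_⟩
  · rw [PySem.Dict.get?_empty, pvFS_none seq _ (by omega)]
  · rw [PySem.Dict.get?_empty, pvFS_none seq _ (by omega)]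
  · rw [PySem.Dict.get?_empty, pvFS_none seq _ (by omega)]
  · intro c
    simp only [PySem.Set.empty, List.not_mem_nil, false_iff]
    rintro ⟨i, hi, hA, _⟩
    have := codon_len_atg seq i (by omega) hA
    omega

lemma mem_setB (seq : String) (c : String) :
    c ∈ pvSetB seq ↔
      ∃ i, 0 ≤ i ∧ pvCodon seq i = "ATG" ∧ pvFS seq (i + 3) = some c := by
  unfold pvSetB
  by_cases h2 : 2 ≤ PySem.Str.len seq
  · have hinv := foldB_inv seq (PySem.Str.len seq - 2).toNat (PySem.Str.len seq - 3)
      (by omega) (by omega) (by omega) (PySem.Dict.empty, PySem.Set.empty)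
      (by rw [show PySem.Str.len seq - 3 + 1 = PySem.Str.len seq - 2 by ring]
          exact inv_init seq h2)
    exact hinv.2.2.2 c
  · rw [PySem.List.pyRange_neg_one_eq_nil (by omega : PySem.Str.len seq - 3 ≤ -1)]
    simp only [List.foldl_nil, PySem.Set.empty, List.not_mem_nil, false_iff]
    rintro ⟨i, hi, hA, _⟩
    have := codon_len_atg seq i hi hA
    omega

-- A-side characterisation
lemma mem_innerA (seq : String) (c : String) :
    ∀ (ps : List Int) (st : PySem.Set String),
      c ∈ pvInnerA seq ps st ↔ c ∈ st ∨ pvFirstStop seq ps = some c := by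
  intro ps
  induction ps with
  | nil => intro st; simp [pvInnerA, pvFirstStop]
  | cons j rest ih =>
    intro st
    simp only [pvInnerA, pvFirstStop, pvCodon]
    split_ifs with hc
    · rw [PySem.Set.mem_add]
      simp [eq_comm]
    · rw [ih st]

lemma nodup_innerA (seq : String) :
    ∀ (ps : List Int) (st : PySem.Set String), st.Nodup → (pvInnerA seq ps st).Nodup := by
  intro ps
  induction ps with
  | nil => intro st h; exact h
  | cons j rest ih =>
    intro st h
    simp only [pvInnerA]
    split_ifs with hc
    · exact PySem.Set.nodup_add _ _ h
    · exact ih st h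

lemma mem_foldA (seq : String) (b : Int) (c : String) :
    ∀ (is : List Int) (st : PySem.Set String),
      c ∈ is.foldl
        (fun st i =>
          if PySem.Str.slice seq (some i) (some (i + 3)) = "ATG" then
            pvInnerA seq (PySem.List.pyRange i b 3) st
          else st) st ↔
      c ∈ st ∨ ∃ i ∈ is, pvCodon seq i = "ATG" ∧
        pvFirstStop seq (PySem.List.pyRange i b 3) = some c := by
  intro is
  induction is with
  | nil => intro st; simp
  | cons i rest ih =>
    intro st
    rw [List.foldl_cons, ih]
    by_cases h : PySem.Str.slice seq (some i) (some (i + 3)) = "ATG"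
    · rw [if_pos h, mem_innerA]
      simp only [List.mem_cons, pvCodon]
      constructor
      · rintro ((hst | hfs) | ⟨j, hj, h1, h2⟩)
        · exact Or.inl hst
        · exact Or.inr ⟨i, Or.inl rfl, h, hfs⟩
        · exact Or.inr ⟨j, Or.inr hj, h1, h2⟩
      · rintro (hst | ⟨j, (rfl | hj), h1, h2⟩)
        · exact Or.inl (Or.inl hst)
        · exact Or.inl (Or.inr h2)
        · exact Or.inr ⟨j, hj, h1, h2⟩
    · rw [if_neg h]
      simp only [List.mem_cons, pvCodon]
      constructor
      · rintro (hst | ⟨j, hj, h1, h2⟩)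
        · exact Or.inl hst
        · exact Or.inr ⟨j, Or.inr hj, h1, h2⟩
      · rintro (hst | ⟨j, (rfl | hj), h1, h2⟩)
        · exact Or.inl hst
        · exact absurd h1 h
        · exact Or.inr ⟨j, hj, h1, h2⟩

lemma notStop_of_ATG (seq : String) (p : Int) (h : pvCodon seq p = "ATG") :
    ¬ (["TAA", "TAG", "TGA"].contains (pvCodon seq p) = true) := by
  rw [h]; decide

lemma firstStop_cons_ATG (seq : String) (p b : Int) (hb : p < b)
    (h : pvCodon seq p = "ATG") :
    pvFirstStop seq (PySem.List.pyRange p b 3) =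
      pvFirstStop seq (PySem.List.pyRange (p + 3) b 3) := by
  rw [pyRange_cons3 p b hb]
  simp only [pvFirstStop]
  rw [if_neg (notStop_of_ATG seq p h)]

lemma mem_setA (seq : String) (c : String) :
    c ∈ pvSetA seq ↔
      ∃ i, 0 ≤ i ∧ pvCodon seq i = "ATG" ∧ pvFS seq (i + 3) = some c := by
  unfold pvSetA
  rw [mem_foldA]
  simp only [PySem.List.mem_pyRange_one, PySem.Set.empty, List.not_mem_nil, false_or]
  constructor
  · rintro ⟨i, ⟨h0, _⟩, hA, hF⟩
    have h3 := codon_len_atg seq i h0 hA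
    rw [firstStop_cons_ATG seq i _ (by omega) hA] at hF
    exact ⟨i, h0, hA, hF⟩
  · rintro ⟨i, h0, hA, hF⟩
    have h3 := codon_len_atg seq i h0 hA
    refine ⟨i, ⟨h0, by omega⟩, hA, ?_⟩
    rw [firstStop_cons_ATG seq i _ (by omega) hA]
    exact hF

lemma nodup_setA (seq : String) : (pvSetA seq).Nodup := by
  unfold pvSetA
  generalize PySem.List.pyRange 0 (PySem.Str.len seq) 1 = is
  suffices H : ∀ (is : List Int) (st : PySem.Set String), st.Nodup →
      (is.foldl
        (fun st i =>
          if PySem.Str.slice seq (some i) (some (i + 3)) = "ATG" then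
            pvInnerA seq (PySem.List.pyRange i (PySem.Str.len seq - 2) 3) st
          else st) st).Nodup from
    H is PySem.Set.empty (by simp [PySem.Set.empty])
  intro is
  induction is with
  | nil => intro st h; exact h
  | cons i rest ih =>
    intro st h
    rw [List.foldl_cons]
    apply ih
    split_ifs with hc
    · exact nodup_innerA seq _ st h
    · exact h

lemma nodup_setB (seq : String) : (pvSetB seq).Nodup :=
  nodup_foldB seq _ _ (by simp [PySem.Set.empty])

lemma mem_setA_iff_mem_setB (seq : String) (c : String) :
    c ∈ pvSetA seq ↔ c ∈ pvSetB seq := by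
  rw [mem_setA, mem_setB]

-- ===== VERDICT (by name: the statement is the Claim_ definition above) =====
theorem find_stops_spec : Claim_equal_find_stops := by
  intro seq _hdom
  unfold Spec_find_stops
  rw [find_stops_eq, find_stops_alt_eq]
  have hperm : (pvSetA seq).Perm (pvSetB seq) :=
    (List.perm_ext_iff_of_nodup (nodup_setA seq) (nodup_setB seq)).mpr
      (fun c => mem_setA_iff_mem_setB seq c)
  have hys : (PySem.List.sorted (pvSetA seq) (fun x => x)).Perm (pvSetB seq) :=
    (PySem.List.sorted_perm (pvSetA seq) (fun x => x) false).trans hperm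
  have hpwle : (PySem.List.sorted (pvSetA seq) (fun x => x)).Pairwise (fun a b => a ≤ b) :=
    PySem.List.sorted_pairwise (pvSetA seq) (fun x => x)
  have hnd : (PySem.List.sorted (pvSetA seq) (fun x => x)).Nodup :=
    ((PySem.List.sorted_perm (pvSetA seq) (fun x => x) false).nodup_iff).mpr (nodup_setA seq)
  have hpwlt : (PySem.List.sorted (pvSetA seq) (fun x => x)).Pairwise (fun a b => a < b) :=
    (hpwle.and hnd).imp (fun h => lt_of_le_of_ne h.1 h.2)
  exact (PySem.List.sorted_eq_of_perm_of_pairwise_lt (pvSetB seq)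
    (PySem.List.sorted (pvSetA seq) (fun x => x)) (fun x => x) hys hpwlt).symm
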